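-- pv_equiv track=rewrite | github.com/xronocode/vibestart | donor_info/memento-main/memento/tests/test_memory_bank_templates.py | _strip_fenced_code_blocks
-- ===== SOURCE A (Python) =====
-- def _strip_fenced_code_blocks(markdown: str) -> str:
--     """
--     Remove fenced code blocks (``` / ```` / etc.) so link checks only apply to
--     prose, not embedded templates/examples.
--     """
--     out_lines: list[str] = []
--     in_fence = False
--     fence_len = 0
--
--     for line in markdown.splitlines(keepends=True):
--         stripped = line.lstrip()
--
--         if not in_fence:
--             if stripped.startswith("```"):
--                 fence_len = len(stripped) - len(stripped.lstrip("`"))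
--                 if fence_len >= 3:
--                     in_fence = True
--                     continue
--             out_lines.append(line)
--             continue
--
--         # In a fenced code block: skip until we hit a closing fence of >= the opening length.
--         if stripped.startswith("`" * fence_len):
--             in_fence = False
--             fence_len = 0
--         continue
--
--     return "".join(out_lines)
-- ===== SOURCE B (Python) =====
-- def _strip_fenced_code_blocks(markdown: str) -> str:
--     """Index-jumping rewrite: skip each fenced block wholesale with an inner
--     closing-fence search instead of a per-line in_fence/fence_len state machine."""
--     lines = markdown.splitlines(keepends=True)
--     n = len(lines)
--     kept = []
--     i = 0
--     while i < n:
--         s = lines[i].lstrip()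
--         fl = len(s) - len(s.lstrip("`"))
--         if s.startswith("```") and fl >= 3:
--             close = "`" * fl
--             i += 1
--             while i < n and not lines[i].lstrip().startswith(close):
--                 i += 1
--             i += 1  # step past the closing fence (or past the end if unclosed)
--         else:
--             kept.append(lines[i])
--             i += 1
--     return "".join(kept)
-- ===== Notes on version B (the rewrite author's own statement) =====
-- stated objective: alternative
-- what changed: Replaces A's per-line fold with in_fence/fence_len state variables by an index-jumping outer loop that, on meeting an opener, runs an inner search for the closing fence and skips the whole block at once, keeping only prose lines.
import Mathlib
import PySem

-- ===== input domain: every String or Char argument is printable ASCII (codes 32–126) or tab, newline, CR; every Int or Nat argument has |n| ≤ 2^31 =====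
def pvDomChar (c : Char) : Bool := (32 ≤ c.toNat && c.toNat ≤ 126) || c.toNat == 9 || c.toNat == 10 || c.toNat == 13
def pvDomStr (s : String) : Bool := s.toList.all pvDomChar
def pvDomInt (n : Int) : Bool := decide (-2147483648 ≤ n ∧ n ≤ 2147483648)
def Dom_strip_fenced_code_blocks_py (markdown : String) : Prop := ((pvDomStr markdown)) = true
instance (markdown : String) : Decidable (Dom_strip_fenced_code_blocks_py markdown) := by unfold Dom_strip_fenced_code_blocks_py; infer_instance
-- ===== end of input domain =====

-- B replaces A's in_fence/fence_len state machine by an index-jumping loop with an inner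
-- closing-fence search (objective: alternative decomposition, same cost).

-- Hand port of str.splitlines(keepends=True): exact on the stated domain, where the only
-- line breaks are '\n', '\r' and '\r\n' (the other Python break characters are outside Dom).
def pySplitKeep : List Char → List (List Char)
  | [] => []
  | '\r' :: '\n' :: rest => ['\r', '\n'] :: pySplitKeep rest
  | '\r' :: rest => ['\r'] :: pySplitKeep rest
  | '\n' :: rest => ['\n'] :: pySplitKeep rest
  | c :: rest =>
    match pySplitKeep rest with
    | [] => [[c]]
    | l :: ls => (c :: l) :: ls

-- Hand port of str.lstrip(chars): drop leading characters contained in chars (exact).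
def pyLstripChars (cs chars : List Char) : List Char := cs.dropWhile (chars.contains ·)

-- ===== PORT A =====
-- state: (out_lines, in_fence, fence_len)
def stripA_step (st : List (List Char) × Bool × Nat) (line : List Char) :
    List (List Char) × Bool × Nat :=
  let stripped := PySem.Chars.lstrip line
  if st.2.1 = false then
    if PySem.Chars.startswith stripped ['`', '`', '`'] then
      let fl := stripped.length - (pyLstripChars stripped ['`']).length
      if 3 ≤ fl then (st.1, true, fl)
      else (st.1 ++ [line], false, fl)
    else (st.1 ++ [line], false, st.2.2)
  else
    if PySem.Chars.startswith stripped (List.replicate st.2.2 '`') then (st.1, false, 0)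
    else st

def strip_fenced_code_blocks_py (markdown : String) : String :=
  let st := (pySplitKeep markdown.toList).foldl stripA_step ([], false, 0)
  String.ofList (PySem.Chars.join [] st.1)

-- ===== PORT B =====
-- inner while loop: advance past lines until just after a closing fence (or past the end)
def dropCloser (fl : Nat) : List (List Char) → List (List Char)
  | [] => []
  | c :: cs =>
    if PySem.Chars.startswith (PySem.Chars.lstrip c) (List.replicate fl '`') then cs
    else dropCloser fl cs

theorem dropCloser_length_le (fl : Nat) (ls : List (List Char)) :
    (dropCloser fl ls).length ≤ ls.length := by
  induction ls with
  | nil => simp [dropCloser]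
  | cons c cs ih =>
    simp only [dropCloser]
    split
    · simp
    · exact Nat.le_succ_of_le ih

-- outer while loop over the remaining lines
def stripB_go : List (List Char) → List (List Char)
  | [] => []
  | l :: rest =>
    let s := PySem.Chars.lstrip l
    let fl := s.length - (pyLstripChars s ['`']).length
    if PySem.Chars.startswith s ['`', '`', '`'] && decide (3 ≤ fl) then
      stripB_go (dropCloser fl rest)
    else l :: stripB_go rest
termination_by ls => ls.length
decreasing_by
  · exact Nat.lt_succ_of_le (dropCloser_length_le _ _)
  · simp

def strip_fenced_code_blocks_py_alt (markdown : String) : String :=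
  String.ofList (PySem.Chars.join [] (stripB_go (pySplitKeep markdown.toList)))

-- ===== PRECONDITION & SPEC =====
def Spec_strip_fenced_code_blocks_py (markdown : String) (out : String) : Prop := out = strip_fenced_code_blocks_py_alt markdown
instance (markdown : String) (out : String) : Decidable (Spec_strip_fenced_code_blocks_py markdown out) := by unfold Spec_strip_fenced_code_blocks_py; infer_instance

-- ===== CLAIM (what is proved, stated in full; the proofs are below) =====
def Claim_equal_strip_fenced_code_blocks_py : Prop := ∀ (markdown : String), Dom_strip_fenced_code_blocks_py markdown → Spec_strip_fenced_code_blocks_py markdown (strip_fenced_code_blocks_py markdown)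

-- ===== LEMMAS AND PROOFS =====

-- A's fold and B's block-jumping recursion produce the same kept lines, from any state.
theorem fold_eq_go (n : Nat) : ∀ ls : List (List Char), ls.length ≤ n →
    ∀ (out : List (List Char)) (fl : Nat),
      ((ls.foldl stripA_step (out, false, fl)).1 = out ++ stripB_go ls) ∧
      ((ls.foldl stripA_step (out, true, fl)).1 = out ++ stripB_go (dropCloser fl ls)) := by
  induction n with
  | zero =>
    intro ls hls out fl
    have : ls = [] := List.eq_nil_of_length_eq_zero (Nat.le_zero.mp hls)
    subst this
    simp [stripB_go, dropCloser]
  | succ n ih =>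
    intro ls hls out fl
    cases ls with
    | nil => simp [stripB_go, dropCloser]
    | cons l rest =>
      have hrest : rest.length ≤ n := by simpa using hls
      constructor
      · -- not in fence
        rw [List.foldl_cons, stripB_go]
        simp only [stripA_step]
        by_cases hsw : PySem.Chars.startswith (PySem.Chars.lstrip l) ['`', '`', '`'] = true
        · by_cases hfl : 3 ≤ (PySem.Chars.lstrip l).length - (pyLstripChars (PySem.Chars.lstrip l) ['`']).length
          · simp only [hsw, hfl, decide_true, Bool.and_self, reduceIte]
            exact (ih rest hrest out _).2
          · simp only [hsw, hfl, decide_false, Bool.and_false, Bool.false_eq_true, reduceIte]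
            rw [(ih rest hrest (out ++ [l]) _).1]
            simp
        · simp only [hsw, Bool.false_and, Bool.false_eq_true, reduceIte]
          rw [(ih rest hrest (out ++ [l]) fl).1]
          simp
      · -- in fence
        rw [List.foldl_cons]
        simp only [stripA_step, dropCloser]
        by_cases hcl : PySem.Chars.startswith (PySem.Chars.lstrip l) (List.replicate fl '`') = true
        · simp only [hcl, reduceIte]
          exact (ih rest hrest out 0).1
        · simp only [hcl, Bool.false_eq_true, reduceIte]
          exact (ih rest hrest out fl).2

-- ===== VERDICT (by name: the statement is the Claim_ definition above) =====
theorem strip_fenced_code_blocks_py_spec : Claim_equal_strip_fenced_code_blocks_py := by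
  intro markdown _
  unfold Spec_strip_fenced_code_blocks_py strip_fenced_code_blocks_py strip_fenced_code_blocks_py_alt
  show String.ofList (PySem.Chars.join []
      ((pySplitKeep markdown.toList).foldl stripA_step ([], false, 0)).1) = _
  rw [(fold_eq_go (pySplitKeep markdown.toList).length _ le_rfl [] 0).1]
  simp
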